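-- pv_equiv track=rewrite | github.com/mobsung/ITS_Esercizi | Python/Esercizi_recupero/Esercizi_funzioni/esercizio_01.py | myDict
-- ===== SOURCE A (Python) =====
-- def myDict(lista: list[tuple[str, str]]) -> dict[str, str]:
--     result_dict: dict[str, str] = {}
--
--     for key, value in lista:
--         if key not in result_dict:
--             result_dict[key] = str(value)
--         else:
--             result_dict[key] += str(value)
--
--     return result_dict
-- ===== SOURCE B (Python) =====
-- def myDict(lista: list[tuple[str, str]]) -> dict[str, str]:
--     keys = list(dict.fromkeys(k for k, _ in lista))
--     return {k: "".join(str(v) for k2, v in lista if k2 == k) for k in keys}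
-- ===== Notes on version B (the rewrite author's own statement) =====
-- stated objective: alternative
-- what changed: Replaces A's single pass over a mutated dict (membership branch, in-place string concatenation) with a dict-free nested-scan algorithm: compute the ordered distinct keys first, then rescan the whole list once per key and join that key's values.
import Mathlib
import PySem

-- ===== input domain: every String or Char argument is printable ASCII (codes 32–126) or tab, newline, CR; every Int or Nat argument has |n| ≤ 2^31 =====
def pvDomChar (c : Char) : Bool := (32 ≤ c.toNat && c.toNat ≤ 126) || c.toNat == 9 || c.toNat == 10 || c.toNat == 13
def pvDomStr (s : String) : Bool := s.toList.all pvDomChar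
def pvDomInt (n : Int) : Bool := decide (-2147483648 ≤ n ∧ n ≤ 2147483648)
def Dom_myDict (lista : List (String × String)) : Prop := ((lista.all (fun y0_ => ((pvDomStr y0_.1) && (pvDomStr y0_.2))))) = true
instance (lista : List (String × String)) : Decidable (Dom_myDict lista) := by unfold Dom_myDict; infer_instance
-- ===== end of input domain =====

-- B replaces A's single-pass mutated-dict algorithm by a dict-free nested scan: ordered distinct keys first, then one full rescan of the list per key (alternative decomposition, same result).


-- ===== PORT A =====
def myDict (lista : List (String × String)) : List (String × String) :=
  (lista.foldl
    (fun d p =>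
      if !(d.contains p.1) then d.insert p.1 p.2
      else d.insert p.1 (d.getD p.1 "" ++ p.2))
    (PySem.Dict.empty : PySem.Dict String String)).items

-- ===== PORT B =====
def myDict_alt (lista : List (String × String)) : List (String × String) :=
  (PySem.List.dedup (lista.map (·.1))).map
    (fun k => (k, PySem.Str.join "" ((lista.filter (fun p => p.1 == k)).map (·.2))))

-- ===== PRECONDITION & SPEC =====
def Spec_myDict (lista : List (String × String)) (out : List (String × String)) : Prop := out = myDict_alt lista
instance (lista : List (String × String)) (out : List (String × String)) : Decidable (Spec_myDict lista out) := by unfold Spec_myDict; infer_instance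

-- ===== CLAIM (what is proved, stated in full; the proofs are below) =====
def Claim_equal_myDict : Prop := ∀ (lista : List (String × String)), Dom_myDict lista → Spec_myDict lista (myDict lista)

-- ===== LEMMAS AND PROOFS =====

lemma str_append_empty (s : String) : s ++ "" = s := by
  apply String.ext; simp

lemma str_append_assoc (a b c : String) : a ++ b ++ c = a ++ (b ++ c) := by
  apply String.ext; simp

lemma join_empty_nil : PySem.Str.join "" ([] : List String) = "" := by decide

lemma intercalate_nil_eq_flatten {α : Type} : ∀ (as : List (List α)),
    List.intercalate [] as = as.flatten := by
  intro as
  induction as with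
  | nil => rfl
  | cons a as ih =>
    cases as with
    | nil => simp [List.intercalate, List.intersperse]
    | cons b bs =>
      simp [List.intercalate, List.intersperse] at ih ⊢
      simpa using ih

lemma join_empty_cons (x : String) (xs : List String) :
    PySem.Str.join "" (x :: xs) = x ++ PySem.Str.join "" xs := by
  apply String.ext
  simp [PySem.Str.join, PySem.Chars.join, intercalate_nil_eq_flatten]

-- A's loop body rewritten in single-insert form (case split on contains)
lemma astep_eq (d : PySem.Dict String String) (p : String × String) :
    (if !(d.contains p.1) then d.insert p.1 p.2
     else d.insert p.1 (d.getD p.1 "" ++ p.2))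
    = d.insert p.1 (if d.contains p.1 then d.getD p.1 "" ++ p.2 else p.2) := by
  by_cases h : d.contains p.1 <;> simp [h]

-- value at key c after A's loop: the concatenation of all values filed under c
lemma a_getD (c : String) (l : List (String × String)) :
    ∀ (d : PySem.Dict String String),
    (l.foldl (fun d p =>
        if !(d.contains p.1) then d.insert p.1 p.2
        else d.insert p.1 (d.getD p.1 "" ++ p.2)) d).getD c ""
      = d.getD c "" ++ PySem.Str.join "" ((l.filter (fun p => p.1 == c)).map (·.2)) := by
  induction l with
  | nil =>
    intro d
    simp only [List.foldl_nil, List.filter_nil, List.map_nil, join_empty_nil]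
    exact (str_append_empty _).symm
  | cons p l ih =>
    intro d
    rw [List.foldl_cons, ih]
    simp only [astep_eq]
    by_cases hk : p.1 = c
    · subst hk
      rw [PySem.Dict.getD_insert_self]
      by_cases hc : d.contains p.1
      · simp [hc, join_empty_cons, str_append_assoc]
      · have hcf : d.contains p.1 = false := by simpa using hc
        simp [hc, join_empty_cons, PySem.Dict.getD_of_not_contains]
    · simp [PySem.Dict.getD_insert, hk]
      exact fun h => (hk h.symm).elim

-- keys after A's loop: the distinct keys of the input, in first-occurrence order
lemma a_keys (l : List (String × String)) :
    (l.foldl (fun d p =>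
        if !(d.contains p.1) then d.insert p.1 p.2
        else d.insert p.1 (d.getD p.1 "" ++ p.2))
      (PySem.Dict.empty : PySem.Dict String String)).keys
      = PySem.Set.ofList (l.map (·.1)) := by
  have hfun : (fun (d : PySem.Dict String String) (p : String × String) =>
      if !(d.contains p.1) then d.insert p.1 p.2
      else d.insert p.1 (d.getD p.1 "" ++ p.2))
      = fun d p => d.insert p.1 (if d.contains p.1 then d.getD p.1 "" ++ p.2 else p.2) := by
    funext d p; exact astep_eq d p
  rw [hfun, PySem.Dict.keys_foldl_insert_key]
  simp [PySem.Set.update_nil_left]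

-- ===== VERDICT (by name: the statement is the Claim_ definition above) =====
theorem myDict_spec : Claim_equal_myDict := by
  intro l _
  unfold Spec_myDict myDict myDict_alt
  set dA := l.foldl (fun d p =>
      if !(d.contains p.1) then d.insert p.1 p.2
      else d.insert p.1 (d.getD p.1 "" ++ p.2))
      (PySem.Dict.empty : PySem.Dict String String) with hdA
  have hAnd : dA.keys.Nodup := by
    rw [hdA]
    have hfun : (fun (d : PySem.Dict String String) (p : String × String) =>
        if !(d.contains p.1) then d.insert p.1 p.2
        else d.insert p.1 (d.getD p.1 "" ++ p.2))
        = fun d p => d.insert p.1 (if d.contains p.1 then d.getD p.1 "" ++ p.2 else p.2) := by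
      funext d p; exact astep_eq d p
    rw [hfun]
    exact PySem.Dict.nodup_keys_foldl_insert_key _ _ _ _ (by simp)
  rw [PySem.Dict.items_eq_map_keys dA hAnd ""]
  have hkeys : dA.keys = PySem.List.dedup (l.map (·.1)) := by
    rw [hdA, a_keys]; simp
  rw [hkeys]
  apply List.map_congr_left
  intro k _
  refine Prod.ext rfl ?_
  rw [hdA, a_getD]
  apply String.ext; simp
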